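-- pv_equiv track=rewrite | github.com/JackOtsig/ttv-yt-arbitration | Twitch.py | reassemble_string
-- ===== SOURCE A (Python) =====
-- def reassemble_string(raw_string, r):
--     if r:
--         real_string = raw_string[2:-3]
--     else:
--         real_string = raw_string
--     final_string = ''
--     prev_char = None
--     for character in real_string:
--         if character == '\\':
--             final_string += '/'
--         elif character == '"' and prev_char == '\\':
--             final_string += "'"
--         else:
--             final_string += character
--         prev_char = character
--     return final_string
-- ===== SOURCE B (Python) =====
-- def reassemble_string(raw_string, r):
--     real_string = raw_string[2:-3] if r else raw_string
--     # pairs '\"' first (the backslash becomes '/' and flips the quote), then bare backslashes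
--     return real_string.replace('\\"', "/'").replace('\\', '/')
-- ===== Notes on version B (the rewrite author's own statement) =====
-- stated objective: simpler
-- what changed: Replaced the character-by-character loop with prev_char state by two chained global str.replace passes: backslash-quote pairs first, then remaining backslashes.
import Mathlib
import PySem

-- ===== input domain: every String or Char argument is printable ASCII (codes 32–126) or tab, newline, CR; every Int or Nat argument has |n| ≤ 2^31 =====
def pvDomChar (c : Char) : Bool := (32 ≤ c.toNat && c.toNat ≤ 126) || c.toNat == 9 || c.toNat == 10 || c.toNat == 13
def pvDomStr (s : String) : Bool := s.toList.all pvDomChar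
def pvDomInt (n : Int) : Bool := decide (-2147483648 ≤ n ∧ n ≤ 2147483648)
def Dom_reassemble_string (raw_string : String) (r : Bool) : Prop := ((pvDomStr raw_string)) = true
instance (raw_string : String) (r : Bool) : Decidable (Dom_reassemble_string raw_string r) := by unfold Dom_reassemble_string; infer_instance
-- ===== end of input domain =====

-- B replaces A's stateful prev_char loop by two chained global replace passes (simpler decomposition).

-- ===== PORT A =====
def reassemble_string (raw_string : String) (r : Bool) : String :=
  let real_string := if r then PySem.Str.slice raw_string (some 2) (some (-3)) else raw_string
  let res := real_string.toList.foldl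
    (fun (st : List Char × Option Char) character =>
      (st.1 ++ (if character = '\\' then ['/']
                else if character = '"' ∧ st.2 = some '\\' then ['\'']
                else [character]), some character))
    ([], none)
  String.ofList res.1

-- ===== PORT B =====
def reassemble_string_alt (raw_string : String) (r : Bool) : String :=
  let real_string := if r then PySem.Str.slice raw_string (some 2) (some (-3)) else raw_string
  PySem.Str.replace (PySem.Str.replace real_string "\\\"" "/'") "\\" "/"

-- ===== PRECONDITION & SPEC =====
def Spec_reassemble_string (raw_string : String) (r : Bool) (out : String) : Prop := out = reassemble_string_alt raw_string r
instance (raw_string : String) (r : Bool) (out : String) : Decidable (Spec_reassemble_string raw_string r out) := by unfold Spec_reassemble_string; infer_instance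

-- ===== CLAIM (what is proved, stated in full; the proofs are below) =====
def Claim_equal_reassemble_string : Prop := ∀ (raw_string : String) (r : Bool), Dom_reassemble_string raw_string r → Spec_reassemble_string raw_string r (reassemble_string raw_string r)

-- ===== LEMMAS AND PROOFS =====

-- A's loop as a simple recursion (proof helper)
def fA : Option Char → List Char → List Char
  | _, [] => []
  | p, c :: t =>
      (if c = '\\' then '/' else if c = '"' ∧ p = some '\\' then '\'' else c) :: fA (some c) t

-- the first replace pass ('\"' → "/'") as a simple recursion
def rep1 : List Char → List Char
  | [] => []
  | [c] => [c]
  | c1 :: c2 :: t => if c1 = '\\' ∧ c2 = '"' then '/' :: '\'' :: rep1 t else c1 :: rep1 (c2 :: t)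

-- the second replace pass ('\' → '/')
def rep2 (l : List Char) : List Char := l.map (fun c => if c = '\\' then '/' else c)

theorem foldA (l : List Char) (acc : List Char) (p : Option Char) :
    (l.foldl
      (fun (st : List Char × Option Char) character =>
        (st.1 ++ (if character = '\\' then ['/']
                  else if character = '"' ∧ st.2 = some '\\' then ['\'']
                  else [character]), some character))
      (acc, p)).1 = acc ++ fA p l := by
  induction l generalizing acc p with
  | nil => simp [fA]
  | cons c t ih =>
    simp only [List.foldl, fA, ih]
    split_ifs <;> simp

theorem go1_eq : ∀ (fuel : Nat) (l acc : List Char), l.length ≤ fuel →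
    PySem.Chars.replace.go ['\\', '"'] ['/', '\''] fuel l acc = acc.reverse ++ rep1 l := by
  intro fuel
  induction fuel with
  | zero => intro l acc h; have : l = [] := by cases l <;> simp_all
            subst this; simp [PySem.Chars.replace.go, rep1]
  | succ n ih =>
    intro l acc h
    match l with
    | [] => simp [PySem.Chars.replace.go, rep1]
    | [c] =>
      have hpre : List.isPrefixOf ['\\', '"'] [c] = false := by
        simp [List.isPrefixOf]
      simp only [PySem.Chars.replace.go, hpre, Bool.false_eq_true, if_false]
      rw [ih [] (c :: acc) (by simp)]
      simp [rep1]
    | c1 :: c2 :: t =>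
      by_cases h1 : c1 = '\\' ∧ c2 = '"'
      · obtain ⟨ha, hb⟩ := h1; subst ha; subst hb
        have hpre : List.isPrefixOf ['\\', '"'] ('\\' :: '"' :: t) = true := by
          simp [List.isPrefixOf]
        simp only [PySem.Chars.replace.go, hpre, if_true]
        have hd : List.drop (['\\', '"'] : List Char).length ('\\' :: '"' :: t) = t := rfl
        rw [hd, ih t _ (by simp at h ⊢; omega)]
        simp [rep1]
      · have hpre : List.isPrefixOf ['\\', '"'] (c1 :: c2 :: t) = false := by
          cases hx : List.isPrefixOf ['\\', '"'] (c1 :: c2 :: t)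
          · rfl
          · exfalso
            simp [List.isPrefixOf] at hx
            exact h1 ⟨hx.1.symm, hx.2.symm⟩
        simp only [PySem.Chars.replace.go, hpre, Bool.false_eq_true, if_false]
        rw [ih (c2 :: t) (c1 :: acc) (by simp at h ⊢; omega)]
        rw [rep1, if_neg h1]
        simp

theorem go2_eq : ∀ (fuel : Nat) (l acc : List Char), l.length ≤ fuel →
    PySem.Chars.replace.go ['\\'] ['/'] fuel l acc = acc.reverse ++ rep2 l := by
  intro fuel
  induction fuel with
  | zero => intro l acc h; have : l = [] := by cases l <;> simp_all
            subst this; simp [PySem.Chars.replace.go, rep2]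
  | succ n ih =>
    intro l acc h
    match l with
    | [] => simp [PySem.Chars.replace.go, rep2]
    | c :: t =>
      by_cases hc : c = '\\'
      · subst hc
        have hpre : List.isPrefixOf ['\\'] ('\\' :: t) = true := by simp [List.isPrefixOf]
        simp only [PySem.Chars.replace.go, hpre, if_true]
        have hd : List.drop (['\\'] : List Char).length ('\\' :: t) = t := rfl
        rw [hd, ih t _ (by simp at h ⊢; omega)]
        simp [rep2]
      · have hpre : List.isPrefixOf ['\\'] (c :: t) = false := by
          cases hx : List.isPrefixOf ['\\'] (c :: t)
          · rfl
          · exfalso; simp [List.isPrefixOf] at hx; exact hc hx.symm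
        simp only [PySem.Chars.replace.go, hpre, Bool.false_eq_true, if_false]
        rw [ih t (c :: acc) (by simp at h ⊢; omega)]
        simp [rep2, hc]

theorem rep1_eq (l : List Char) : PySem.Chars.replace l ['\\', '"'] ['/', '\''] = rep1 l := by
  rw [PySem.Chars.replace]
  simp only [List.isEmpty]
  exact go1_eq l.length l [] le_rfl

theorem rep2_eq (l : List Char) : PySem.Chars.replace l ['\\'] ['/'] = rep2 l := by
  rw [PySem.Chars.replace]
  simp only [List.isEmpty]
  exact go2_eq l.length l [] le_rfl

theorem L1 : ∀ (l : List Char) (p : Option Char), p ≠ some '\\' → fA p l = rep2 (rep1 l)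
  | [], _, _ => by simp [fA, rep1, rep2]
  | [c], p, hp => by
      by_cases hc : c = '\\' <;> simp_all [fA, rep1, rep2]
  | c1 :: c2 :: t, p, hp => by
      by_cases hb : c1 = '\\'
      · subst hb
        by_cases hq : c2 = '"'
        · subst hq
          have ih := L1 t (some '"') (by simp)
          simp [fA, rep1, rep2, ih]
        · have ih := L1 (c2 :: t) none (by simp)
          have hswap : fA (some '\\') (c2 :: t) = fA none (c2 :: t) := by
            simp [fA, hq]
          have hrep : rep1 ('\\' :: c2 :: t) = '\\' :: rep1 (c2 :: t) := by
            rw [rep1, if_neg (fun hx => hq hx.2)]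
          calc fA p ('\\' :: c2 :: t) = '/' :: fA (some '\\') (c2 :: t) := by simp [fA]
            _ = '/' :: rep2 (rep1 (c2 :: t)) := by rw [hswap, ih]
            _ = rep2 (rep1 ('\\' :: c2 :: t)) := by rw [hrep]; simp [rep2]
      · have ih := L1 (c2 :: t) (some c1) (by simpa using hb)
        have hrep : rep1 (c1 :: c2 :: t) = c1 :: rep1 (c2 :: t) := by
          rw [rep1, if_neg (fun hx => hb hx.1)]
        calc fA p (c1 :: c2 :: t) = c1 :: fA (some c1) (c2 :: t) := by
              simp [fA, hb, hp]
          _ = c1 :: rep2 (rep1 (c2 :: t)) := by rw [ih]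
          _ = rep2 (rep1 (c1 :: c2 :: t)) := by rw [hrep]; simp [rep2, hb]
termination_by l => l.length

-- ===== VERDICT (by name: the statement is the Claim_ definition above) =====
theorem reassemble_string_spec : Claim_equal_reassemble_string := by
  intro s r _hd
  show reassemble_string s r = reassemble_string_alt s r
  simp only [reassemble_string, reassemble_string_alt]
  set real := if r then PySem.Str.slice s (some 2) (some (-3)) else s
  rw [foldA real.toList [] none]
  rw [PySem.Str.replace, PySem.Str.toList_replace]
  have h1 : ("\\\"" : String).toList = ['\\', '"'] := by decide
  have h2 : ("/'" : String).toList = ['/', '\''] := by decide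
  have h3 : ("\\" : String).toList = ['\\'] := by decide
  have h4 : ("/" : String).toList = ['/'] := by decide
  rw [h1, h2, h3, h4, rep1_eq, rep2_eq]
  rw [List.nil_append, L1 real.toList none (by simp)]
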